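-- pv_equiv track=rewrite | github.com/Azuhmier/ohmfa | ohmfa/url/processor.py | _split_by_dot
-- ===== SOURCE A (Python) =====
-- def _split_by_dot(arg):
--     arg_items = arg.split('.')
--     arg_ar = []
--     for idx, item in enumerate(arg_items):
--         if idx:
--             arg_ar.append('.')
--         arg_ar.append(item)
--     arg_ar   = [x for x in arg_ar if x]
--     return arg_ar
-- ===== SOURCE B (Python) =====
-- def _split_by_dot(arg):
--     # single left-to-right tokenizer: emit a separator token per dot, else the maximal
--     # run of non-dot characters; no split, interleave or filter passes.
--     out = []
--     i, n = 0, len(arg)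
--     while i < n:
--         if arg[i] == '.':
--             out.append('.')
--             i += 1
--         else:
--             j = i
--             while j < n and arg[j] != '.':
--                 j += 1
--             out.append(arg[i:j])
--             i = j
--     return out
-- ===== Notes on version B (the rewrite author's own statement) =====
-- stated objective: alternative
-- what changed: Replaced the split/enumerate-interleave/filter pipeline with one direct left-to-right tokenizer that emits a separator token per dot character and the maximal run of other characters otherwise, so no intermediate lists and no post-filter exist.
import Mathlib
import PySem

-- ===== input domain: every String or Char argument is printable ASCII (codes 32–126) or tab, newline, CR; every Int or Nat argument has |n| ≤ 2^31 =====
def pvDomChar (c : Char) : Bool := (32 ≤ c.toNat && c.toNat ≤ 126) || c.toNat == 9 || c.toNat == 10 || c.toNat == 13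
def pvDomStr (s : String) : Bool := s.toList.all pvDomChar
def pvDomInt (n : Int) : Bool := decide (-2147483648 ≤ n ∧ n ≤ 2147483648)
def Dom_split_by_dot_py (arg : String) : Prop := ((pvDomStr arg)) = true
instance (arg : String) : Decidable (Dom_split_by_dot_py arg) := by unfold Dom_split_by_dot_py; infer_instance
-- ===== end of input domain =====

-- B rewrites A's split/interleave/filter pipeline as one direct left-to-right tokenizer (alternative decomposition, same cost).

-- ===== PORT A =====
-- arg.split('.') with a nonempty separator is exactly PySem.Chars.splitOn on the character list.
def split_by_dot_py (arg : String) : List String :=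
  let arg_items := (PySem.Chars.splitOn arg.toList ['.']).map String.ofList
  let arg_ar := (PySem.List.enumerate arg_items 0).foldl
      (fun acc p => (if p.1 ≠ 0 then acc ++ ["."] else acc) ++ [p.2]) []
  arg_ar.filter (fun x => x ≠ "")

-- ===== PORT B =====
-- B's outer while-loop: per step either one '.' token, or the maximal non-dot run
-- (the inner while-loop computing j and the slice arg[i:j] are the takeWhile/dropWhile pair).
def tokLoop : List Char → List (List Char)
  | [] => []
  | c :: rest =>
      if c = '.' then ['.'] :: tokLoop rest
      else ((c :: rest).takeWhile (· ≠ '.')) :: tokLoop ((c :: rest).dropWhile (· ≠ '.'))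
  termination_by l => l.length
  decreasing_by
    · simp
    · simp only [List.dropWhile]
      rename_i h
      simp only [ne_eq, h, decide_false, Bool.not_false]
      exact Nat.lt_succ_of_le (List.length_dropWhile_le _ _)

def split_by_dot_py_alt (arg : String) : List String :=
  (tokLoop arg.toList).map String.ofList

-- ===== PRECONDITION & SPEC =====
def Spec_split_by_dot_py (arg : String) (out : List String) : Prop := out = split_by_dot_py_alt arg
instance (arg : String) (out : List String) : Decidable (Spec_split_by_dot_py arg out) := by unfold Spec_split_by_dot_py; infer_instance

-- ===== CLAIM (what is proved, stated in full; the proofs are below) =====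
def Claim_equal_split_by_dot_py : Prop := ∀ (arg : String), Dom_split_by_dot_py arg → Spec_split_by_dot_py arg (split_by_dot_py arg)

-- ===== LEMMAS AND PROOFS =====

-- A's str.split('.') result, stated structurally (used to reason about PySem.Chars.splitOn).
def mySplit : List Char → List (List Char)
  | [] => [[]]
  | c :: rest =>
      if c = '.' then [] :: mySplit rest
      else match mySplit rest with
        | [] => [[c]]
        | h :: t => (c :: h) :: t

-- right-to-left variant of the tokenizer, convenient for induction on characters
def tok : List Char → List (List Char)
  | [] => []
  | c :: rest =>
      let ts := tok rest
      if c = '.' then ['.'] :: ts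
      else match ts with
        | [] => [[c]]
        | t :: ts' => if t = ['.'] then [c] :: ts else (c :: t) :: ts'

-- A's interleaving of '.' between the split fragments
def inter : List (List Char) → List (List Char)
  | [] => []
  | p :: t => p :: t.flatMap (fun q => [['.'], q])

theorem mySplit_ne_nil (cs : List Char) : mySplit cs ≠ [] := by
  cases cs with
  | nil => simp [mySplit]
  | cons c rest =>
    simp only [mySplit]
    split
    · simp
    · split <;> simp_all

theorem mySplit_dot (rest : List Char) : mySplit ('.' :: rest) = [] :: mySplit rest := by
  simp [mySplit]

theorem mySplit_cons {c : Char} {rest h : List Char} {t : List (List Char)}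
    (hc : c ≠ '.') (hm : mySplit rest = h :: t) :
    mySplit (c :: rest) = (c :: h) :: t := by
  simp [mySplit, hc, hm]

theorem tok_dot (rest : List Char) : tok ('.' :: rest) = ['.'] :: tok rest := by
  simp [tok]

theorem mySplit_no_dot (cs : List Char) : ∀ p ∈ mySplit cs, '.' ∉ p := by
  induction cs with
  | nil => simp [mySplit]
  | cons c rest ih =>
    by_cases hc : c = '.'
    · subst hc
      rw [mySplit_dot]
      intro p hp
      rcases List.mem_cons.mp hp with hp | hp
      · simp [hp]
      · exact ih p hp
    · cases hm : mySplit rest with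
      | nil => exact absurd hm (mySplit_ne_nil rest)
      | cons h t =>
        rw [mySplit_cons hc hm]
        intro p hp
        rcases List.mem_cons.mp hp with hp | hp
        · subst hp
          intro hmem
          rcases List.mem_cons.mp hmem with hd | hd
          · exact hc hd.symm
          · exact ih h (hm ▸ List.mem_cons_self) hd
        · exact ih p (hm ▸ List.mem_cons_of_mem h hp)

theorem splitOn_go_spec (fuel : Nat) :
    ∀ (l cur : List Char) (acc : List (List Char)), l.length < fuel →
      PySem.Chars.splitOn.go ['.'] fuel l cur acc
        = acc.reverse ++ (mySplit l).modifyHead (cur.reverse ++ ·) := by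
  induction fuel with
  | zero => intro l cur acc h; omega
  | succ fuel ih =>
    intro l cur acc h
    cases l with
    | nil => simp [PySem.Chars.splitOn.go, mySplit]
    | cons c rest =>
      by_cases hc : c = '.'
      · subst hc
        rw [show PySem.Chars.splitOn.go ['.'] (fuel+1) ('.' :: rest) cur acc
              = PySem.Chars.splitOn.go ['.'] fuel rest [] (cur.reverse :: acc) by
            simp [PySem.Chars.splitOn.go, List.isPrefixOf]]
        rw [ih rest [] (cur.reverse :: acc) (by simpa using Nat.lt_of_succ_lt_succ h)]
        cases hm : mySplit rest with
        | nil => exact absurd hm (mySplit_ne_nil rest)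
        | cons hd t => simp [mySplit, hm]
      · rw [show PySem.Chars.splitOn.go ['.'] (fuel+1) (c :: rest) cur acc
              = PySem.Chars.splitOn.go ['.'] fuel rest (c :: cur) acc by
            have hpre : List.isPrefixOf ['.'] (c :: rest) = false := by
              cases hq : ('.' == c) with
              | false => simp [List.isPrefixOf, hq]
              | true => exact absurd (eq_of_beq hq).symm hc
            simp [PySem.Chars.splitOn.go, hpre]]
        rw [ih rest (c :: cur) acc (by simpa using Nat.lt_of_succ_lt_succ h)]
        cases hm : mySplit rest with
        | nil => exact absurd hm (mySplit_ne_nil rest)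
        | cons hd t => simp [mySplit, hm, hc]

theorem splitOn_eq (cs : List Char) : PySem.Chars.splitOn cs ['.'] = mySplit cs := by
  have h := splitOn_go_spec (cs.length + 1) cs [] [] (by omega)
  rw [show PySem.Chars.splitOn cs ['.']
        = PySem.Chars.splitOn.go ['.'] (cs.length + 1) cs [] [] from rfl, h]
  cases hm : mySplit cs with
  | nil => simp
  | cons h t => simp

theorem main_tok (cs : List Char) :
    (inter (mySplit cs)).filter (fun p => p ≠ []) = tok cs := by
  induction cs with
  | nil => simp [mySplit, inter, tok]
  | cons c rest ih =>
    cases hm : mySplit rest with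
    | nil => exact absurd hm (mySplit_ne_nil rest)
    | cons h t =>
      rw [hm] at ih
      by_cases hc : c = '.'
      · subst hc
        rw [mySplit_dot, hm, tok_dot, ← ih]
        by_cases hh : h = [] <;> simp [inter, List.filter_cons, hh]
      · rw [mySplit_cons hc hm]
        have hhd : h ≠ ['.'] := fun he =>
          mySplit_no_dot rest h (hm ▸ List.mem_cons_self) (by simp [he])
        by_cases hh : h = []
        · subst hh
          have ih' : (t.flatMap (fun q => [['.'], q])).filter (fun p => p ≠ []) = tok rest := by
            simpa [inter, List.filter_cons] using ih
          cases t with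
          | nil => simp [inter, tok, hc, ← ih']
          | cons p t' => simp [inter, tok, hc, ← ih', List.filter_cons]
        · have ih' : tok rest
              = h :: (t.flatMap (fun q => [['.'], q])).filter (fun p => p ≠ []) := by
            rw [← ih]; simp [inter, List.filter_cons, hh]
          simp [inter, tok, hc, ih', hhd, List.filter_cons, hh]

-- a nonempty dot-free run, followed by nothing or by a dot, is one token of tok
theorem tok_cons_run : ∀ (r : List Char), r ≠ [] → '.' ∉ r →
    ∀ xs, (xs = [] ∨ ∃ ys, xs = '.' :: ys) → tok (r ++ xs) = r :: tok xs := by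
  intro r
  induction r with
  | nil => intro hr; exact absurd rfl hr
  | cons a r' ih =>
    intro _ hnd xs hxs
    have ha : a ≠ '.' := fun h => hnd (h ▸ List.mem_cons_self)
    by_cases hr' : r' = []
    · subst hr'
      rcases hxs with h | ⟨ys, h⟩ <;> subst h <;> simp [tok, ha]
    · have hrec := ih hr' (fun h => hnd (List.mem_cons_of_mem a h)) xs hxs
      have hhd : r' ≠ ['.'] := fun he => hnd (by simp [he])
      simp [tok, ha, hrec, hhd]

theorem dropWhile_head_dot : ∀ (l : List Char) (d : Char) (ds : List Char),
    l.dropWhile (· ≠ '.') = d :: ds → d = '.' := by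
  intro l
  induction l with
  | nil => intro d ds h; simp [List.dropWhile] at h
  | cons a l ih =>
    intro d ds h
    by_cases ha : a = '.'
    · subst ha
      rw [List.dropWhile_cons_of_neg (by simp)] at h
      exact (List.cons.injEq _ _ _ _ ▸ h).1.symm
    · rw [List.dropWhile_cons_of_pos (by simp [ha])] at h
      exact ih d ds h

theorem tok_eq_tokLoop (cs : List Char) : tok cs = tokLoop cs := by
  induction cs using tokLoop.induct with
  | case1 => simp [tok, tokLoop]
  | case2 rest ih =>
    rw [tok_dot, tokLoop, if_pos rfl, ih]
  | case3 c rest hc ih =>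
    have hrun : (c :: rest).takeWhile (· ≠ '.') ≠ [] := by
      simp [List.takeWhile, hc]
    have hnd : '.' ∉ (c :: rest).takeWhile (· ≠ '.') := by
      intro hmem
      have := List.mem_takeWhile_imp hmem
      simp at this
    have hdrop : (c :: rest).dropWhile (· ≠ '.') = []
        ∨ ∃ ys, (c :: rest).dropWhile (· ≠ '.') = '.' :: ys := by
      cases hd : (c :: rest).dropWhile (· ≠ '.') with
      | nil => exact Or.inl rfl
      | cons d ds =>
        have hdd : d = '.' := dropWhile_head_dot (c :: rest) d ds hd
        subst hdd
        exact Or.inr ⟨ds, rfl⟩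
    have hsplit : (c :: rest).takeWhile (· ≠ '.') ++ (c :: rest).dropWhile (· ≠ '.') = c :: rest :=
      List.takeWhile_append_dropWhile
    calc tok (c :: rest)
        = tok ((c :: rest).takeWhile (· ≠ '.') ++ (c :: rest).dropWhile (· ≠ '.')) := by
          rw [hsplit]
      _ = (c :: rest).takeWhile (· ≠ '.') :: tok ((c :: rest).dropWhile (· ≠ '.')) :=
          tok_cons_run _ hrun hnd _ hdrop
      _ = (c :: rest).takeWhile (· ≠ '.') :: tokLoop ((c :: rest).dropWhile (· ≠ '.')) := by
          rw [ih]
      _ = tokLoop (c :: rest) := by rw [tokLoop, if_neg hc]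

-- A's enumerate/append loop over the tail (index ≥ 1) interleaves "." before each fragment
theorem foldl_enum_pos (ps : List (List Char)) :
    ∀ (acc : List String) (s : Int), 0 < s →
      (PySem.List.enumerate (ps.map String.ofList) s).foldl
          (fun acc p => (if p.1 ≠ 0 then acc ++ ["."] else acc) ++ [p.2]) acc
        = acc ++ ps.flatMap (fun q => [".", String.ofList q]) := by
  induction ps with
  | nil => intro acc s _; simp [PySem.List.enumerate_nil]
  | cons p t ih =>
    intro acc s hs
    rw [List.map_cons, PySem.List.enumerate_cons, List.foldl_cons]
    rw [ih _ (s + 1) (by omega)]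
    have hne : s ≠ 0 := by omega
    simp only [if_pos hne]
    have hdot : (String.ofList ['.'] : String) = "." := rfl
    simp [hdot]

theorem foldl_enum (ps : List (List Char)) :
    (PySem.List.enumerate (ps.map String.ofList) 0).foldl
        (fun acc p => (if p.1 ≠ 0 then acc ++ ["."] else acc) ++ [p.2]) []
      = (inter ps).map String.ofList := by
  cases ps with
  | nil => simp [PySem.List.enumerate_nil, inter]
  | cons p t =>
    rw [List.map_cons, PySem.List.enumerate_cons, List.foldl_cons]
    rw [foldl_enum_pos t _ (0 + 1) (by omega)]
    have hdot : (String.ofList ['.'] : String) = "." := rfl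
    simp [inter, List.map_flatMap, hdot]

theorem filter_map_mk (l : List (List Char)) :
    (l.map String.ofList).filter (fun x => x ≠ "") = (l.filter (fun p => p ≠ [])).map String.ofList := by
  rw [List.filter_map]
  congr 1
  apply List.filter_congr
  intro p _
  by_cases hp : p = []
  · subst hp; rfl
  · have hne : String.ofList p ≠ "" := by
      intro h
      exact hp ((String.ofList_eq.mp h).trans (by decide))
    simp [hne, hp]

-- ===== VERDICT (by name: the statement is the Claim_ definition above) =====
theorem split_by_dot_py_spec : Claim_equal_split_by_dot_py := by
  intro arg _
  show split_by_dot_py arg = split_by_dot_py_alt arg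
  have h1 : split_by_dot_py arg
      = ((PySem.List.enumerate ((PySem.Chars.splitOn arg.toList ['.']).map String.ofList) 0).foldl
          (fun acc p => (if p.1 ≠ 0 then acc ++ ["."] else acc) ++ [p.2]) []).filter
          (fun x => x ≠ "") := rfl
  rw [h1, splitOn_eq, foldl_enum, filter_map_mk, main_tok, tok_eq_tokLoop]
  rfl
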